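-- pv_equiv track=rewrite | github.com/sphinx-doc/sphinx | sphinx/builders/html/_assets.py | _integrity_concordance
-- ===== SOURCE A (Python) =====
-- from collections import defaultdict
--
-- def _integrity_concordance(integrity_a: str, integrity_b: str) -> bool:
--     """Determines whether two W3C SubResource Integrity values could
--     possibly agree on the content that they both refer to.  This requires
--     that they share at least one common hash value for each algorithm that
--     they both contain a checksum for.
--     """
--
--     def _hashes_by_algorithm(integrity: str) -> dict[str, set[str]]:
--         hashes = defaultdict(set)
--         for checksum in integrity.split():
--             algorithm, _ = checksum.split("-")
--             hashes[algorithm].add(checksum)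
--         return hashes
--
--     hashes_a, hashes_b = (
--         _hashes_by_algorithm(integrity_a),
--         _hashes_by_algorithm(integrity_b),
--     )
--     for algorithm in hashes_a.keys() & hashes_b.keys():
--         if not hashes_a[algorithm] & hashes_b[algorithm]:
--             return False
--     return True
-- ===== SOURCE B (Python) =====
-- def _integrity_concordance(integrity_a: str, integrity_b: str) -> bool:
--     """Flat-set reformulation: collect full checksums and algorithm names,
--     intersect the checksum sets once, and check that every algorithm common
--     to both sides is witnessed by some shared checksum."""
--
--     def _parse(integrity: str) -> tuple[set, set]:
--         sums, algos = set(), set()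
--         for checksum in integrity.split():
--             algorithm, _ = checksum.split("-")
--             sums.add(checksum)
--             algos.add(algorithm)
--         return sums, algos
--
--     sums_a, algos_a = _parse(integrity_a)
--     sums_b, algos_b = _parse(integrity_b)
--     shared = sums_a & sums_b
--     satisfied = {c.split("-")[0] for c in shared}
--     return (algos_a & algos_b) <= satisfied
-- ===== Notes on version B (the rewrite author's own statement) =====
-- stated objective: alternative
-- what changed: Replaces the per-algorithm grouping dict and the loop intersecting one hash-set per common algorithm with flat sets: one global intersection of full checksum strings, then a subset test 'common algorithms <= algorithms witnessed by a shared checksum'.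
import Mathlib
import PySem

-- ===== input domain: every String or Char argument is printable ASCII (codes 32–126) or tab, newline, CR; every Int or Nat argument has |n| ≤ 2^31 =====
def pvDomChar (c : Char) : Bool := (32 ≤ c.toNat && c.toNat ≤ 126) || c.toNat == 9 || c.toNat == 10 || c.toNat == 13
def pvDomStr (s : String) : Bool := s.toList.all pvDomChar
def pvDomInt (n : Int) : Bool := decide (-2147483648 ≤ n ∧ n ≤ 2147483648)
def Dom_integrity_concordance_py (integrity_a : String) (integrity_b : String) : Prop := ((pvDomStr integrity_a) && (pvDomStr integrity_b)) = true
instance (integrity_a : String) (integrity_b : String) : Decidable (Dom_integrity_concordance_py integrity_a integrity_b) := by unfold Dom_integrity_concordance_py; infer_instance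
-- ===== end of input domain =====

-- B replaces A's per-algorithm grouping dict and per-algorithm intersection loop by flat
-- checksum/algorithm sets, one global checksum intersection and a subset test (alternative).

-- ===== PORT A =====
-- 'algorithm, _ = checksum.split("-")': the first piece of the split; inside Pre_ the split
-- has exactly two pieces (the headD default is never used there).
def pvAlgoOf (c : String) : String := ((PySem.Str.split? c "-").getD []).headD ""

-- hashes = defaultdict(set); for checksum in integrity.split(): hashes[algorithm].add(checksum)
def pvHashesByAlg (integrity : String) : PySem.Dict String (PySem.Set String) :=
  (PySem.Str.split₀ integrity).foldl
    (fun d c => d.modify (pvAlgoOf c) PySem.Set.empty (fun s => PySem.Set.add s c))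
    PySem.Dict.empty

-- the for-loop with early 'return False'
def pvLoopA (common : List String) (ha hb : PySem.Dict String (PySem.Set String)) : Bool :=
  match common with
  | [] => true
  | alg :: rest =>
      if PySem.Set.inter (ha.getD alg PySem.Set.empty) (hb.getD alg PySem.Set.empty) = []
      then false
      else pvLoopA rest ha hb

def integrity_concordance_py (integrity_a : String) (integrity_b : String) : Bool :=
  let hashes_a := pvHashesByAlg integrity_a
  let hashes_b := pvHashesByAlg integrity_b
  pvLoopA (PySem.Set.inter hashes_a.keys hashes_b.keys) hashes_a hashes_b

-- ===== PORT B =====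
-- sums, algos = set(), set(); for checksum in integrity.split(): sums.add(checksum); algos.add(algorithm)
def pvParse (integrity : String) : PySem.Set String × PySem.Set String :=
  (PySem.Str.split₀ integrity).foldl
    (fun p c => (PySem.Set.add p.1 c, PySem.Set.add p.2 (pvAlgoOf c)))
    (PySem.Set.empty, PySem.Set.empty)

def integrity_concordance_py_alt (integrity_a : String) (integrity_b : String) : Bool :=
  let pa := pvParse integrity_a
  let pb := pvParse integrity_b
  let shared := PySem.Set.inter pa.1 pb.1
  let satisfied := PySem.Set.ofList (shared.map (fun c => ((PySem.Str.split? c "-").getD []).headD ""))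
  PySem.Set.issubset (PySem.Set.inter pa.2 pb.2) satisfied

-- ===== PRECONDITION & SPEC =====
-- Pre_ excludes exactly the inputs where Python raises ValueError: some whitespace-separated
-- token does not split on '-' into exactly two pieces (the unpack 'algorithm, _ = checksum.split("-")').
def Pre_integrity_concordance_py (integrity_a : String) (integrity_b : String) : Prop :=
  ∀ c ∈ PySem.Str.split₀ integrity_a ++ PySem.Str.split₀ integrity_b,
    ((PySem.Str.split? c "-").getD []).length = 2
instance (integrity_a : String) (integrity_b : String) : Decidable (Pre_integrity_concordance_py integrity_a integrity_b) := by unfold Pre_integrity_concordance_py; infer_instance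

def pvWitness_integrity_concordance_py : String × String :=
  ("sha256-aaa sha384-bbb", "sha256-aaa md5-ccc")

def Spec_integrity_concordance_py (integrity_a : String) (integrity_b : String) (out : Bool) : Prop := out = integrity_concordance_py_alt integrity_a integrity_b
instance (integrity_a : String) (integrity_b : String) (out : Bool) : Decidable (Spec_integrity_concordance_py integrity_a integrity_b out) := by unfold Spec_integrity_concordance_py; infer_instance

-- ===== CLAIM (what is proved, stated in full; the proofs are below) =====
def Claim_equal_integrity_concordance_py : Prop := ∀ (integrity_a : String) (integrity_b : String), Dom_integrity_concordance_py integrity_a integrity_b → Pre_integrity_concordance_py integrity_a integrity_b → Spec_integrity_concordance_py integrity_a integrity_b (integrity_concordance_py integrity_a integrity_b)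

-- ===== LEMMAS AND PROOFS =====

theorem pv_mem_getD_foldl (L : List String) (d : PySem.Dict String (PySem.Set String))
    (alg c : String) :
    c ∈ (L.foldl (fun d c => d.modify (pvAlgoOf c) PySem.Set.empty (fun s => PySem.Set.add s c)) d).getD alg PySem.Set.empty
      ↔ c ∈ d.getD alg PySem.Set.empty ∨ (c ∈ L ∧ pvAlgoOf c = alg) := by
  induction L generalizing d with
  | nil => simp
  | cons x xs ih =>
      simp only [List.foldl_cons, ih, PySem.Dict.getD_modify, List.mem_cons]
      by_cases h : alg = pvAlgoOf x
      · subst h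
        simp [PySem.Set.mem_add]
        tauto
      · simp [h]
        constructor
        · rintro (hc | hc); · tauto
          · tauto
        · rintro (hc | ⟨(rfl | hx), ha⟩)
          · tauto
          · exact absurd ha.symm h
          · tauto


theorem pv_mem_getD (integrity alg c : String) :
    c ∈ (pvHashesByAlg integrity).getD alg PySem.Set.empty
      ↔ c ∈ PySem.Str.split₀ integrity ∧ pvAlgoOf c = alg := by
  rw [pvHashesByAlg, pv_mem_getD_foldl]
  simp [PySem.Dict.getD_empty, PySem.Set.empty]


theorem pv_mem_keys (integrity alg : String) :
    alg ∈ (pvHashesByAlg integrity).keys ↔ ∃ c ∈ PySem.Str.split₀ integrity, pvAlgoOf c = alg := by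
  rw [pvHashesByAlg]
  rw [PySem.Dict.keys_foldl_modify_key]
  simp [PySem.Set.mem_update, PySem.Dict.keys_empty, eq_comm]


theorem pv_loopA_iff (common : List String) (ha hb : PySem.Dict String (PySem.Set String)) :
    pvLoopA common ha hb = true
      ↔ ∀ alg ∈ common,
          PySem.Set.inter (ha.getD alg PySem.Set.empty) (hb.getD alg PySem.Set.empty) ≠ [] := by
  induction common with
  | nil => simp [pvLoopA]
  | cons x xs ih =>
      rw [pvLoopA]
      split_ifs with h <;> simp_all


theorem pv_parse_foldl (L : List String) (p : PySem.Set String × PySem.Set String) (x : String) :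
    (x ∈ (L.foldl (fun p c => (PySem.Set.add p.1 c, PySem.Set.add p.2 (pvAlgoOf c))) p).1
      ↔ x ∈ p.1 ∨ x ∈ L) ∧
    (x ∈ (L.foldl (fun p c => (PySem.Set.add p.1 c, PySem.Set.add p.2 (pvAlgoOf c))) p).2
      ↔ x ∈ p.2 ∨ ∃ c ∈ L, pvAlgoOf c = x) := by
  induction L generalizing p with
  | nil => simp
  | cons y ys ih =>
      simp only [List.foldl_cons, ih, PySem.Set.mem_add, List.mem_cons]
      constructor
      · tauto
      · constructor
        · rintro (⟨h | h⟩ | ⟨c, hc, ha⟩)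
          · tauto
          · exact Or.inr ⟨y, Or.inl rfl, h.symm⟩
          · exact Or.inr ⟨c, Or.inr hc, ha⟩
        · rintro (h | ⟨c, (rfl | hc), ha⟩) <;> tauto


theorem pv_parse_fst (integrity c : String) :
    c ∈ (pvParse integrity).1 ↔ c ∈ PySem.Str.split₀ integrity := by
  rw [pvParse]; rw [(pv_parse_foldl _ _ _).1]; simp [PySem.Set.empty]


theorem pv_parse_snd (integrity alg : String) :
    alg ∈ (pvParse integrity).2 ↔ ∃ c ∈ PySem.Str.split₀ integrity, pvAlgoOf c = alg := by
  rw [pvParse]; rw [(pv_parse_foldl _ _ _).2]; simp [PySem.Set.empty]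


theorem pv_A_iff (a b : String) :
    integrity_concordance_py a b = true
      ↔ ∀ alg, (∃ c ∈ PySem.Str.split₀ a, pvAlgoOf c = alg) →
               (∃ c ∈ PySem.Str.split₀ b, pvAlgoOf c = alg) →
               ∃ c, c ∈ PySem.Str.split₀ a ∧ c ∈ PySem.Str.split₀ b ∧ pvAlgoOf c = alg := by
  rw [integrity_concordance_py]
  rw [pv_loopA_iff]
  constructor
  · intro h alg hka hkb
    have hm : alg ∈ PySem.Set.inter (pvHashesByAlg a).keys (pvHashesByAlg b).keys := by
      rw [PySem.Set.mem_inter, pv_mem_keys, pv_mem_keys]; exact ⟨hka, hkb⟩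
    have := h alg hm
    rcases List.exists_mem_of_ne_nil _ this with ⟨c, hc⟩
    rw [PySem.Set.mem_inter, pv_mem_getD, pv_mem_getD] at hc
    exact ⟨c, hc.1.1, hc.2.1, hc.1.2⟩
  · intro h alg hm hnil
    rw [PySem.Set.mem_inter, pv_mem_keys, pv_mem_keys] at hm
    rcases h alg hm.1 hm.2 with ⟨c, h1, h2, h3⟩
    have : c ∈ PySem.Set.inter ((pvHashesByAlg a).getD alg PySem.Set.empty) ((pvHashesByAlg b).getD alg PySem.Set.empty) := by
      rw [PySem.Set.mem_inter, pv_mem_getD, pv_mem_getD]; exact ⟨⟨h1, h3⟩, ⟨h2, h3⟩⟩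
    rw [hnil] at this
    simp at this


theorem pv_B_iff (a b : String) :
    integrity_concordance_py_alt a b = true
      ↔ ∀ alg, (∃ c ∈ PySem.Str.split₀ a, pvAlgoOf c = alg) →
               (∃ c ∈ PySem.Str.split₀ b, pvAlgoOf c = alg) →
               ∃ c, c ∈ PySem.Str.split₀ a ∧ c ∈ PySem.Str.split₀ b ∧ pvAlgoOf c = alg := by
  rw [integrity_concordance_py_alt]
  simp only [PySem.Set.issubset_iff, PySem.Set.mem_inter, PySem.Set.mem_ofList, List.mem_map,
    pv_parse_fst, pv_parse_snd]
  constructor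
  · intro h alg hka hkb
    rcases h alg ⟨hka, hkb⟩ with ⟨c, hc, rfl⟩
    exact ⟨c, hc.1, hc.2, rfl⟩
  · intro h alg ⟨hka, hkb⟩
    rcases h alg hka hkb with ⟨c, h1, h2, h3⟩
    exact ⟨c, ⟨h1, h2⟩, h3⟩

-- ===== VERDICT (by name: the statement is the Claim_ definition above) =====
theorem integrity_concordance_py_spec : Claim_equal_integrity_concordance_py := by
  intro a b _ _
  unfold Spec_integrity_concordance_py
  have hA := pv_A_iff a b
  have hB := pv_B_iff a b
  exact Bool.eq_iff_iff.mpr (hA.trans hB.symm)
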